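-- pv_equiv track=rewrite | github.com/lemene/RASM | create_consensus_by_bed/cluster_for_reg.py | cluster_by_density
-- ===== SOURCE A (Python) =====
-- def cal_density(reg_ls, radius, t1, t2):    # t1表示超大区间，t2表示中等区间
--     density_ls = []
--     for idx, reg in enumerate(reg_ls):
--         density = 0
--         ## left
--         for i in range(idx - 1, -1, -1):
--             now_reg = reg_ls[i]
--             if reg[1] - now_reg[2] > radius:break
--             if now_reg[2] - now_reg[1] > t1:density += 3
--             elif now_reg[2] - now_reg[1] > t2:density += 2
--             else: density += 1
--         ## right
--         for i in range(idx, len(reg_ls)):   # 还包括自身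
--             now_reg = reg_ls[i]
--             if now_reg[1] - reg[2] > radius:break
--             if now_reg[2] - now_reg[1] > t1:density += 3
--             elif now_reg[2] - now_reg[1] > t2:density += 2
--         density_ls.append(density)
--     return density_ls
--
-- def cluster_by_density(reg_ls, clu1, clu2, t1, t2, radius):
--     ls = []
--     # radius = 2000000
--     # t1, t2 = 100000, 10000
--     density_ls = cal_density(reg_ls, radius, t1, t2)
--     pre_reg = None
--     max_density = -1
--     for idx, reg in enumerate(reg_ls):
--         if pre_reg:
--             max_density = max(density_ls[idx], density_ls[idx - 1])
--             if max_density >= 3:clu = clu1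
--             else:clu = clu2
--             ##
--             if reg[1] - pre_reg[2] < clu:
--                 pre_reg = [pre_reg[0], pre_reg[1], max(pre_reg[2], reg[2])]
--             else:
--                 ls.append(pre_reg)
--                 pre_reg = reg
--         else:pre_reg = reg
--     if pre_reg:
--         ls.append(pre_reg)
--     return ls
-- ===== SOURCE B (Python) =====
-- # B: O(n log n) re-implementation: per-row weights + prefix sums; the contiguous
-- # neighbour runs are found with monotone stacks queried by binary search instead
-- # of A's O(n^2) rescans.
--
-- def _count_lt(vals, thr):
--     # number of leading elements of ascending list `vals` that are < thr
--     lo, hi = 0, len(vals)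
--     while lo < hi:
--         mid = (lo + hi) // 2
--         if vals[mid] < thr:
--             lo = mid + 1
--         else:
--             hi = mid
--     return lo
--
-- def _count_gt(vals, thr):
--     # number of leading elements of descending list `vals` that are > thr
--     lo, hi = 0, len(vals)
--     while lo < hi:
--         mid = (lo + hi) // 2
--         if vals[mid] > thr:
--             lo = mid + 1
--         else:
--             hi = mid
--     return lo
--
-- def cluster_by_density(reg_ls, clu1, clu2, t1, t2, radius):
--     n = len(reg_ls)
--     # weights: left scans count 3/2/1, right scans count 3/2/0
--     p3 = [0]
--     p2 = [0]
--     for reg in reg_ls: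
--         d = reg[2] - reg[1]
--         if d > t1:
--             w3, w2 = 3, 3
--         elif d > t2:
--             w3, w2 = 2, 2
--         else:
--             w3, w2 = 1, 0
--         p3.append(p3[-1] + w3)
--         p2.append(p2[-1] + w2)
--
--     density_ls = [0] * n
--
--     # left runs: for idx, the run is (b, idx-1] with b = rightmost i < idx
--     # having reg_ls[i][2] < reg_ls[idx][1] - radius (or -1); stack keeps the
--     # strict suffix-minima of ends, values ascending.
--     stk_i, stk_v = [], []
--     for idx in range(n):
--         cnt = _count_lt(stk_v, reg_ls[idx][1] - radius)
--         b = stk_i[cnt - 1] if cnt > 0 else -1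
--         density_ls[idx] += p3[idx] - p3[b + 1]
--         e2 = reg_ls[idx][2]
--         while stk_v and stk_v[-1] >= e2:
--             stk_v.pop()
--             stk_i.pop()
--         stk_v.append(e2)
--         stk_i.append(idx)
--
--     # right runs: for idx, the run is [idx, e-1] with e = leftmost i >= idx
--     # having reg_ls[i][1] > reg_ls[idx][2] + radius (or n); stack keeps the
--     # strict prefix-maxima of starts seen from the right, values descending.
--     stk_i, stk_v = [], []
--     for idx in range(n - 1, -1, -1):
--         s1 = reg_ls[idx][1]
--         while stk_v and stk_v[-1] <= s1:
--             stk_v.pop()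
--             stk_i.pop()
--         stk_v.append(s1)
--         stk_i.append(idx)
--         cnt = _count_gt(stk_v, reg_ls[idx][2] + radius)
--         e = stk_i[cnt - 1] if cnt > 0 else n
--         density_ls[idx] += p2[e] - p2[idx]
--
--     # density-guided merge (same fold as the task demands: it is sequential)
--     ls = []
--     pre_reg = None
--     for idx in range(n):
--         reg = reg_ls[idx]
--         if pre_reg is None:
--             pre_reg = reg
--             continue
--         clu = clu1 if max(density_ls[idx], density_ls[idx - 1]) >= 3 else clu2
--         if reg[1] - pre_reg[2] < clu:
--             pre_reg = [pre_reg[0], pre_reg[1], max(pre_reg[2], reg[2])]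
--         else:
--             ls.append(pre_reg)
--             pre_reg = reg
--     if pre_reg is not None:
--         ls.append(pre_reg)
--     return ls
-- ===== Notes on version B (the rewrite author's own statement) =====
-- stated objective: faster
-- what changed: Replaces cal_density's per-interval O(n) left/right rescans with per-row weights + prefix sums and two monotone stacks queried by binary search to locate each run boundary; the sequential density-guided merge fold is kept.
import Mathlib
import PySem

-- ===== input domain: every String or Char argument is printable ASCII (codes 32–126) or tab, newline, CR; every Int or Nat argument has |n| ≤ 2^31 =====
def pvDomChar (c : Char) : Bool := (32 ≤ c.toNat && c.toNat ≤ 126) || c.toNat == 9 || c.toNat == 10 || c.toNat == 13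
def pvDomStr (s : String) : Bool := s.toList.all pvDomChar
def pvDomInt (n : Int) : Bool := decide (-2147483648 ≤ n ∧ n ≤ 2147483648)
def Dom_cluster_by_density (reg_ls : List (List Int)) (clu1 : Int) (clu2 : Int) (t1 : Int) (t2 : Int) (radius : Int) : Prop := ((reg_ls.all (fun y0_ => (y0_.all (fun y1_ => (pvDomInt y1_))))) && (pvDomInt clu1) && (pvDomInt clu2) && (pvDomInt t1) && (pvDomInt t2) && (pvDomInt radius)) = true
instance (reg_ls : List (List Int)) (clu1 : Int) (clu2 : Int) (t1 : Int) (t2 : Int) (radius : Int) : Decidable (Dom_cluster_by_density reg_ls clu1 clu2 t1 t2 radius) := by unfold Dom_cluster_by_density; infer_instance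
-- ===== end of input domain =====

-- B replaces A's quadratic per-interval left/right rescans by per-row weights with
-- prefix sums plus monotone stacks queried by binary search (O(n log n)); the final
-- density-guided merge fold is kept (it is inherently sequential).

-- ===== PORT A =====
-- row/element access; Pre_ keeps every used index in range, so the defaults never fire
def pvRow (rs : List (List Int)) (i : Nat) : List Int := (PySem.List.pyGet? rs (i : Int)).getD []
def pvEl (r : List Int) (k : Nat) : Int := (PySem.List.pyGet? r (k : Int)).getD 0

-- cal_density's left loop: `for i in range(idx-1, -1, -1)` with break, accumulating density
def pvLeftGo (rs : List (List Int)) (radius t1 t2 reg1 : Int) : Nat → Int → Int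
  | 0, acc => acc
  | i + 1, acc =>
    let now := pvRow rs i
    if reg1 - pvEl now 2 > radius then acc
    else pvLeftGo rs radius t1 t2 reg1 i
      (acc + (if pvEl now 2 - pvEl now 1 > t1 then 3 else if pvEl now 2 - pvEl now 1 > t2 then 2 else 1))

-- cal_density's right loop: `for i in range(idx, len(reg_ls))` with break (note: no +1 case)
def pvRightGo (radius t1 t2 reg2 : Int) : List (List Int) → Int → Int
  | [], acc => acc
  | now :: rest, acc =>
    if pvEl now 1 - reg2 > radius then acc
    else pvRightGo radius t1 t2 reg2 rest
      (acc + (if pvEl now 2 - pvEl now 1 > t1 then 3 else if pvEl now 2 - pvEl now 1 > t2 then 2 else 0))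

def pvCalDensity (rs : List (List Int)) (radius t1 t2 : Int) : List Int :=
  (List.range rs.length).map fun idx =>
    pvRightGo radius t1 t2 (pvEl (pvRow rs idx) 2) (rs.drop idx)
      (pvLeftGo rs radius t1 t2 (pvEl (pvRow rs idx) 1) idx 0)

-- cluster_by_density's merge loop (pre_reg is never the empty list under Pre_, so
-- Python truthiness of pre_reg is modelled by the Option)
def pvMergeA (clu1 clu2 : Int) (density : List Int) : Nat → List (List Int) → Option (List Int) → List (List Int) → List (List Int)
  | _, [], none, ls => ls
  | _, [], some p, ls => ls ++ [p]
  | idx, reg :: rest, none, ls => pvMergeA clu1 clu2 density (idx + 1) rest (some reg) ls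
  | idx, reg :: rest, some p, ls =>
    let md := max ((PySem.List.pyGet? density (idx : Int)).getD 0) ((PySem.List.pyGet? density ((idx : Int) - 1)).getD 0)
    let clu := if md ≥ 3 then clu1 else clu2
    if pvEl reg 1 - pvEl p 2 < clu then
      pvMergeA clu1 clu2 density (idx + 1) rest (some [pvEl p 0, pvEl p 1, max (pvEl p 2) (pvEl reg 2)]) ls
    else
      pvMergeA clu1 clu2 density (idx + 1) rest (some reg) (ls ++ [p])

def cluster_by_density (reg_ls : List (List Int)) (clu1 : Int) (clu2 : Int) (t1 : Int) (t2 : Int) (radius : Int) : List (List Int) :=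
  pvMergeA clu1 clu2 (pvCalDensity reg_ls radius t1 t2) 0 reg_ls none []

-- ===== PORT B =====
-- Source B's _count_lt: lower-bound binary search on the ascending value list
def pvBsLt (vals : List Int) (thr : Int) (lo hi : Nat) : Nat :=
  if lo < hi then
    let mid := (lo + hi) / 2
    if (PySem.List.pyGet? vals (mid : Int)).getD 0 < thr then pvBsLt vals thr (mid + 1) hi
    else pvBsLt vals thr lo mid
  else lo
termination_by hi - lo
decreasing_by all_goals omega

-- Source B's _count_gt: binary search on the descending value list
def pvBsGt (vals : List Int) (thr : Int) (lo hi : Nat) : Nat :=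
  if lo < hi then
    let mid := (lo + hi) / 2
    if (PySem.List.pyGet? vals (mid : Int)).getD 0 > thr then pvBsGt vals thr (mid + 1) hi
    else pvBsGt vals thr lo mid
  else lo
termination_by hi - lo
decreasing_by all_goals omega

-- `while stk and stk[-1][2nd] >= e2: pop` (stack bottom-first, as the Python lists;
-- the parallel lists stk_i/stk_v are paired)
def pvPopGe (v : Int) (stk : List (Nat × Int)) : List (Nat × Int) :=
  match h : stk.getLast? with
  | none => stk
  | some p => if v ≤ p.2 then pvPopGe v stk.dropLast else stk
termination_by stk.length
decreasing_by
  have hne : stk ≠ [] := by intro e; subst e; simp at h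
  have := List.length_pos_iff.mpr hne
  simp [List.length_dropLast]; omega

-- `while stk and stk[-1][2nd] <= s1: pop`
def pvPopLe (v : Int) (stk : List (Nat × Int)) : List (Nat × Int) :=
  match h : stk.getLast? with
  | none => stk
  | some p => if p.2 ≤ v then pvPopLe v stk.dropLast else stk
termination_by stk.length
decreasing_by
  have hne : stk ≠ [] := by intro e; subst e; simp at h
  have := List.length_pos_iff.mpr hne
  simp [List.length_dropLast]; omega

-- Source B's first loop: weights 3/2/1 and 3/2/0 per row, accumulated into both prefix sums
def pvPrefixGo (t1 t2 : Int) (s3 s2 : Int) : List (List Int) → List Int × List Int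
  | [] => ([], [])
  | r :: rest =>
    let d := pvEl r 2 - pvEl r 1
    let w := if d > t1 then ((3 : Int), (3 : Int)) else if d > t2 then ((2 : Int), (2 : Int)) else ((1 : Int), (0 : Int))
    let res := pvPrefixGo t1 t2 (s3 + w.1) (s2 + w.2) rest
    ((s3 + w.1) :: res.1, (s2 + w.2) :: res.2)

-- Source B's left pass: query the ascending stack, emit p3[idx]-p3[b+1], then pop/push
def pvLeftPass (p3 : List Int) (radius : Int) : Nat → List (Nat × Int) → List (List Int) → List Int
  | _, _, [] => []
  | idx, stk, reg :: rest =>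
    let vals := stk.map Prod.snd
    let cnt := pvBsLt vals (pvEl reg 1 - radius) 0 vals.length
    let b : Int := if 0 < cnt then ((stk.getD (cnt - 1) (0, 0)).1 : Int) else -1
    let contrib := (PySem.List.pyGet? p3 (idx : Int)).getD 0 - (PySem.List.pyGet? p3 (b + 1)).getD 0
    let e2 := pvEl reg 2
    contrib :: pvLeftPass p3 radius (idx + 1) (pvPopGe e2 stk ++ [(idx, e2)]) rest

-- Source B's right pass: idx runs n-1 … 0 (the fuel is idx+1); pop/push first, then query,
-- prepending contributions so the accumulator ends up in ascending index order
def pvRightPass (rs : List (List Int)) (p2 : List Int) (radius : Int) (n : Nat) : Nat → List (Nat × Int) → List Int → List Int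
  | 0, _, acc => acc
  | i + 1, stk, acc =>
    let reg := pvRow rs i
    let s1 := pvEl reg 1
    let stk' := pvPopLe s1 stk ++ [(i, s1)]
    let vals := stk'.map Prod.snd
    let cnt := pvBsGt vals (pvEl reg 2 + radius) 0 vals.length
    let e : Nat := if 0 < cnt then (stk'.getD (cnt - 1) (0, 0)).1 else n
    let contrib := (PySem.List.pyGet? p2 (e : Int)).getD 0 - (PySem.List.pyGet? p2 (i : Int)).getD 0
    pvRightPass rs p2 radius n i stk' (contrib :: acc)

-- Source B's merge loop (same sequential fold as A's; `pre_reg is None` → Option)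
def pvMergeB (clu1 clu2 : Int) (density : List Int) : Nat → List (List Int) → Option (List Int) → List (List Int) → List (List Int)
  | _, [], none, ls => ls
  | _, [], some p, ls => ls ++ [p]
  | idx, reg :: rest, none, ls => pvMergeB clu1 clu2 density (idx + 1) rest (some reg) ls
  | idx, reg :: rest, some p, ls =>
    let clu := if max ((PySem.List.pyGet? density (idx : Int)).getD 0) ((PySem.List.pyGet? density ((idx : Int) - 1)).getD 0) ≥ 3 then clu1 else clu2
    if pvEl reg 1 - pvEl p 2 < clu then
      pvMergeB clu1 clu2 density (idx + 1) rest (some [pvEl p 0, pvEl p 1, max (pvEl p 2) (pvEl reg 2)]) ls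
    else
      pvMergeB clu1 clu2 density (idx + 1) rest (some reg) (ls ++ [p])

def cluster_by_density_alt (reg_ls : List (List Int)) (clu1 : Int) (clu2 : Int) (t1 : Int) (t2 : Int) (radius : Int) : List (List Int) :=
  let n := reg_ls.length
  let ps := pvPrefixGo t1 t2 0 0 reg_ls
  let p3 := 0 :: ps.1
  let p2 := 0 :: ps.2
  let dl := pvLeftPass p3 radius 0 [] reg_ls
  let dr := pvRightPass reg_ls p2 radius n n [] []
  pvMergeB clu1 clu2 (List.zipWith (· + ·) dl dr) 0 reg_ls none []

-- ===== PRECONDITION & SPEC =====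
-- Pre_ excludes exactly the inputs where Python A raises IndexError: a row shorter
-- than 3 is indexed at [1]/[2] by cal_density on every row.
def Pre_cluster_by_density (reg_ls : List (List Int)) (clu1 : Int) (clu2 : Int) (t1 : Int) (t2 : Int) (radius : Int) : Prop :=
  ∀ r ∈ reg_ls, 3 ≤ r.length
instance (reg_ls : List (List Int)) (clu1 : Int) (clu2 : Int) (t1 : Int) (t2 : Int) (radius : Int) : Decidable (Pre_cluster_by_density reg_ls clu1 clu2 t1 t2 radius) := by unfold Pre_cluster_by_density; infer_instance

def pvWitness_cluster_by_density : List (List Int) × Int × Int × Int × Int × Int :=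
  ([[0, 1, 2], [2, 3, 9], [5, 11, 12]], 5, 2, 3, 1, 4)

def Spec_cluster_by_density (reg_ls : List (List Int)) (clu1 : Int) (clu2 : Int) (t1 : Int) (t2 : Int) (radius : Int) (out : List (List Int)) : Prop := out = cluster_by_density_alt reg_ls clu1 clu2 t1 t2 radius
instance (reg_ls : List (List Int)) (clu1 : Int) (clu2 : Int) (t1 : Int) (t2 : Int) (radius : Int) (out : List (List Int)) : Decidable (Spec_cluster_by_density reg_ls clu1 clu2 t1 t2 radius out) := by unfold Spec_cluster_by_density; infer_instance

-- ===== CLAIM (what is proved, stated in full; the proofs are below) =====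
def Claim_equal_cluster_by_density : Prop := ∀ (reg_ls : List (List Int)) (clu1 : Int) (clu2 : Int) (t1 : Int) (t2 : Int) (radius : Int), Dom_cluster_by_density reg_ls clu1 clu2 t1 t2 radius → Pre_cluster_by_density reg_ls clu1 clu2 t1 t2 radius → Spec_cluster_by_density reg_ls clu1 clu2 t1 t2 radius (cluster_by_density reg_ls clu1 clu2 t1 t2 radius)

-- ===== LEMMAS AND PROOFS =====

-- spec-side abbreviations
def pvC1 (rs : List (List Int)) (i : Nat) : Int := pvEl (pvRow rs i) 1
def pvC2 (rs : List (List Int)) (i : Nat) : Int := pvEl (pvRow rs i) 2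
def pvW3 (t1 t2 : Int) (r : List Int) : Int := if pvEl r 2 - pvEl r 1 > t1 then 3 else if pvEl r 2 - pvEl r 1 > t2 then 2 else 1
def pvW2 (t1 t2 : Int) (r : List Int) : Int := if pvEl r 2 - pvEl r 1 > t1 then 3 else if pvEl r 2 - pvEl r 1 > t2 then 2 else 0
def pvP3 (t1 t2 : Int) (rs : List (List Int)) (k : Nat) : Int := ((rs.take k).map (pvW3 t1 t2)).sum
def pvP2 (t1 t2 : Int) (rs : List (List Int)) (k : Nat) : Int := ((rs.take k).map (pvW2 t1 t2)).sum

-- break position of A's left scan at idx, encoded as b+1 (0 when no break)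
def pvBreak1 (rs : List (List Int)) (thr : Int) : Nat → Nat
  | 0 => 0
  | m + 1 => if pvC2 rs m < thr then m + 1 else pvBreak1 rs thr m

-- stop position of A's right scan starting at idx (first j ≥ idx with c1 j > thr, else n)
def pvStopGo (rs : List (List Int)) (thr : Int) (idx : Nat) : List (List Int) → Nat
  | [] => idx
  | _ :: rest => if pvC1 rs idx > thr then idx else pvStopGo rs thr (idx + 1) rest

-- stack invariants
def pvInvL (rs : List (List Int)) (idx : Nat) (stk : List (Nat × Int)) : Prop :=
  (∀ p ∈ stk, p.1 < idx ∧ p.2 = pvC2 rs p.1) ∧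
  stk.Pairwise (fun a b => a.1 < b.1 ∧ a.2 < b.2) ∧
  (∀ i < idx, ∃ p ∈ stk, i ≤ p.1 ∧ p.2 ≤ pvC2 rs i)

def pvInvR (rs : List (List Int)) (i : Nat) (stk : List (Nat × Int)) : Prop :=
  (∀ p ∈ stk, i ≤ p.1 ∧ p.1 < rs.length ∧ p.2 = pvC1 rs p.1) ∧
  stk.Pairwise (fun a b => b.1 < a.1 ∧ b.2 < a.2) ∧
  (∀ j, i ≤ j → j < rs.length → ∃ p ∈ stk, p.1 ≤ j ∧ pvC1 rs j ≤ p.2)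


-- index-cast helper: Python xs[n] for a Nat n in range is List.getD
theorem pvGetNat {α : Type} [Inhabited α] (xs : List α) (n : Nat) (d : α) :
    (PySem.List.pyGet? xs ((n : Nat) : Int)).getD d = xs.getD n d := by
  simp [PySem.List.pyGet?_natCast, List.getD]

-- ---- pvPopGe / pvPopLe facts ----
theorem popGe_nil (v : Int) : pvPopGe v [] = [] := by
  rw [pvPopGe]; rfl

theorem popGe_concat (v : Int) (xs : List (Nat × Int)) (p : Nat × Int) :
    pvPopGe v (xs ++ [p]) = if v ≤ p.2 then pvPopGe v xs else xs ++ [p] := by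
  rw [pvPopGe]
  split
  next h => simp at h
  next q h =>
    rw [List.getLast?_concat] at h
    injection h with h'
    subst h'
    rw [List.dropLast_concat]

theorem popLe_nil (v : Int) : pvPopLe v [] = [] := by
  rw [pvPopLe]; rfl

theorem popLe_concat (v : Int) (xs : List (Nat × Int)) (p : Nat × Int) :
    pvPopLe v (xs ++ [p]) = if p.2 ≤ v then pvPopLe v xs else xs ++ [p] := by
  rw [pvPopLe]
  split
  next h => simp at h
  next q h =>
    rw [List.getLast?_concat] at h
    injection h with h'
    subst h'
    rw [List.dropLast_concat]

theorem popGe_subset (v : Int) (stk : List (Nat × Int)) : ∀ p ∈ pvPopGe v stk, p ∈ stk := by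
  induction stk using List.reverseRecOn with
  | nil => simp [popGe_nil]
  | append_singleton xs q ih =>
    rw [popGe_concat]
    split_ifs with h
    · intro p hp; exact List.mem_append_left _ (ih p hp)
    · intro p hp; exact hp

theorem popGe_pairwise (v : Int) (R : Nat × Int → Nat × Int → Prop) (stk : List (Nat × Int))
    (h : stk.Pairwise R) : (pvPopGe v stk).Pairwise R := by
  induction stk using List.reverseRecOn with
  | nil => simpa [popGe_nil]
  | append_singleton xs q ih =>
    rw [popGe_concat]
    rcases List.pairwise_append.mp h with ⟨h1, _, _⟩
    split_ifs with hv
    · exact ih h1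
    · exact h

theorem popGe_small (v : Int) (stk : List (Nat × Int))
    (h : stk.Pairwise (fun a b => a.1 < b.1 ∧ a.2 < b.2)) :
    ∀ p ∈ pvPopGe v stk, p.2 < v := by
  induction stk using List.reverseRecOn with
  | nil => simp [popGe_nil]
  | append_singleton xs q ih =>
    rw [popGe_concat]
    rcases List.pairwise_append.mp h with ⟨h1, _, h3⟩
    split_ifs with hv
    · exact ih h1
    · intro p hp
      rcases List.mem_append.mp hp with hp | hp
      · exact lt_trans (h3 p hp q (List.mem_singleton_self q)).2 (by omega)
      · simp at hp; subst hp; omega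

theorem popGe_dropped (v : Int) (stk : List (Nat × Int)) :
    ∀ p ∈ stk, p ∈ pvPopGe v stk ∨ v ≤ p.2 := by
  induction stk using List.reverseRecOn with
  | nil => simp
  | append_singleton xs q ih =>
    rw [popGe_concat]
    split_ifs with hv
    · intro p hp
      rcases List.mem_append.mp hp with hp | hp
      · exact ih p hp
      · simp at hp; subst hp; right; exact hv
    · intro p hp; left; exact hp

theorem popLe_subset (v : Int) (stk : List (Nat × Int)) : ∀ p ∈ pvPopLe v stk, p ∈ stk := by
  induction stk using List.reverseRecOn with
  | nil => simp [popLe_nil]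
  | append_singleton xs q ih =>
    rw [popLe_concat]
    split_ifs with h
    · intro p hp; exact List.mem_append_left _ (ih p hp)
    · intro p hp; exact hp

theorem popLe_pairwise (v : Int) (R : Nat × Int → Nat × Int → Prop) (stk : List (Nat × Int))
    (h : stk.Pairwise R) : (pvPopLe v stk).Pairwise R := by
  induction stk using List.reverseRecOn with
  | nil => simpa [popLe_nil]
  | append_singleton xs q ih =>
    rw [popLe_concat]
    rcases List.pairwise_append.mp h with ⟨h1, _, _⟩
    split_ifs with hv
    · exact ih h1
    · exact h

theorem popLe_big (v : Int) (stk : List (Nat × Int))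
    (h : stk.Pairwise (fun a b => b.1 < a.1 ∧ b.2 < a.2)) :
    ∀ p ∈ pvPopLe v stk, v < p.2 := by
  induction stk using List.reverseRecOn with
  | nil => simp [popLe_nil]
  | append_singleton xs q ih =>
    rw [popLe_concat]
    rcases List.pairwise_append.mp h with ⟨h1, _, h3⟩
    split_ifs with hv
    · exact ih h1
    · intro p hp
      rcases List.mem_append.mp hp with hp | hp
      · exact lt_trans (by omega) (h3 p hp q (List.mem_singleton_self q)).2
      · simp at hp; subst hp; omega

theorem popLe_dropped (v : Int) (stk : List (Nat × Int)) :
    ∀ p ∈ stk, p ∈ pvPopLe v stk ∨ p.2 ≤ v := by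
  induction stk using List.reverseRecOn with
  | nil => simp
  | append_singleton xs q ih =>
    rw [popLe_concat]
    split_ifs with hv
    · intro p hp
      rcases List.mem_append.mp hp with hp | hp
      · exact ih p hp
      · simp at hp; subst hp; right; exact hv
    · intro p hp; left; exact hp

-- ---- binary search lemmas ----
theorem pvBsLt_spec (vals : List Int) (thr : Int)
    (hs : ∀ i j, i ≤ j → j < vals.length → vals.getD i 0 ≤ vals.getD j 0) :
    ∀ fuel lo hi, hi - lo ≤ fuel → lo ≤ hi → hi ≤ vals.length →
    (∀ k, k < lo → vals.getD k 0 < thr) →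
    (∀ k, hi ≤ k → k < vals.length → ¬ vals.getD k 0 < thr) →
    (lo ≤ pvBsLt vals thr lo hi ∧ pvBsLt vals thr lo hi ≤ hi) ∧
    (∀ k, k < pvBsLt vals thr lo hi → vals.getD k 0 < thr) ∧
    (∀ k, pvBsLt vals thr lo hi ≤ k → k < vals.length → ¬ vals.getD k 0 < thr) := by
  intro fuel
  induction fuel with
  | zero =>
    intro lo hi hf hle hhi h1 h2
    have : lo = hi := by omega
    subst this
    rw [pvBsLt]
    simp only [lt_irrefl, if_false]
    exact ⟨⟨le_refl _, le_refl _⟩, h1, h2⟩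
  | succ m ih =>
    intro lo hi hf hle hhi h1 h2
    rw [pvBsLt]
    by_cases hlt : lo < hi
    · simp only [hlt, if_true]
      rw [pvGetNat]
      split_ifs with hm
      · have hside : ∀ k, k < (lo + hi) / 2 + 1 → vals.getD k 0 < thr := by
          intro k hk
          exact lt_of_le_of_lt (hs k ((lo + hi) / 2) (by omega) (by omega)) hm
        obtain ⟨hb, hA, hB⟩ := ih ((lo + hi) / 2 + 1) hi (by omega) (by omega) hhi hside h2
        exact ⟨⟨by omega, hb.2⟩, hA, hB⟩
      · have hside : ∀ k, (lo + hi) / 2 ≤ k → k < vals.length → ¬ vals.getD k 0 < thr := by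
          intro k hk hk2 hc
          exact hm (lt_of_le_of_lt (hs ((lo + hi) / 2) k hk hk2) hc)
        obtain ⟨hb, hA, hB⟩ := ih lo ((lo + hi) / 2) (by omega) (by omega) (by omega) h1 hside
        exact ⟨⟨hb.1, by omega⟩, hA, hB⟩
    · rw [if_neg hlt]
      have : lo = hi := by omega
      subst this
      exact ⟨⟨le_refl _, le_refl _⟩, h1, h2⟩

theorem pvBsGt_spec (vals : List Int) (thr : Int)
    (hs : ∀ i j, i ≤ j → j < vals.length → vals.getD j 0 ≤ vals.getD i 0) :
    ∀ fuel lo hi, hi - lo ≤ fuel → lo ≤ hi → hi ≤ vals.length →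
    (∀ k, k < lo → vals.getD k 0 > thr) →
    (∀ k, hi ≤ k → k < vals.length → ¬ vals.getD k 0 > thr) →
    (lo ≤ pvBsGt vals thr lo hi ∧ pvBsGt vals thr lo hi ≤ hi) ∧
    (∀ k, k < pvBsGt vals thr lo hi → vals.getD k 0 > thr) ∧
    (∀ k, pvBsGt vals thr lo hi ≤ k → k < vals.length → ¬ vals.getD k 0 > thr) := by
  intro fuel
  induction fuel with
  | zero =>
    intro lo hi hf hle hhi h1 h2
    have : lo = hi := by omega
    subst this
    rw [pvBsGt]
    simp only [lt_irrefl, if_false]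
    exact ⟨⟨le_refl _, le_refl _⟩, h1, h2⟩
  | succ m ih =>
    intro lo hi hf hle hhi h1 h2
    rw [pvBsGt]
    by_cases hlt : lo < hi
    · simp only [hlt, if_true]
      rw [pvGetNat]
      split_ifs with hm
      · have hside : ∀ k, k < (lo + hi) / 2 + 1 → vals.getD k 0 > thr := by
          intro k hk
          exact lt_of_lt_of_le hm (hs k ((lo + hi) / 2) (by omega) (by omega))
        obtain ⟨hb, hA, hB⟩ := ih ((lo + hi) / 2 + 1) hi (by omega) (by omega) hhi hside h2
        exact ⟨⟨by omega, hb.2⟩, hA, hB⟩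
      · have hside : ∀ k, (lo + hi) / 2 ≤ k → k < vals.length → ¬ vals.getD k 0 > thr := by
          intro k hk hk2 hc
          exact hm (lt_of_lt_of_le hc (hs ((lo + hi) / 2) k hk hk2))
        obtain ⟨hb, hA, hB⟩ := ih lo ((lo + hi) / 2) (by omega) (by omega) (by omega) h1 hside
        exact ⟨⟨hb.1, by omega⟩, hA, hB⟩
    · rw [if_neg hlt]
      have : lo = hi := by omega
      subst this
      exact ⟨⟨le_refl _, le_refl _⟩, h1, h2⟩


-- ---- characterizations of A's break/stop positions ----
theorem pvBreak1_char (rs : List (List Int)) (thr : Int) :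
    ∀ idx, pvBreak1 rs thr idx ≤ idx ∧
      (∀ k, pvBreak1 rs thr idx ≤ k → k < idx → ¬ pvC2 rs k < thr) ∧
      (0 < pvBreak1 rs thr idx → pvC2 rs (pvBreak1 rs thr idx - 1) < thr) := by
  intro idx
  induction idx with
  | zero => exact ⟨le_refl _, by omega, by simp [pvBreak1]⟩
  | succ m ih =>
    rw [pvBreak1]
    split_ifs with hc
    · exact ⟨le_refl _, by omega, by simpa⟩
    · obtain ⟨a, b, c⟩ := ih
      refine ⟨by omega, ?_, c⟩
      intro k hk hk2
      by_cases hkm : k = m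
      · subst hkm; exact hc
      · exact b k hk (by omega)

theorem pvUniqBreak (P : Nat → Prop) (idx m1 m2 : Nat)
    (a1 : m1 ≤ idx) (b1 : ∀ k, m1 ≤ k → k < idx → ¬ P k) (c1 : 0 < m1 → P (m1 - 1))
    (a2 : m2 ≤ idx) (b2 : ∀ k, m2 ≤ k → k < idx → ¬ P k) (c2 : 0 < m2 → P (m2 - 1)) : m1 = m2 := by
  by_contra h
  rcases Nat.lt_or_ge m1 m2 with hlt | hge
  · exact b1 (m2 - 1) (by omega) (by omega) (c2 (by omega))
  · exact b2 (m1 - 1) (by omega) (by omega) (c1 (by omega))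

theorem pvUniqStop (P : Nat → Prop) (i n j1 j2 : Nat)
    (a1 : i ≤ j1) (a1' : j1 ≤ n) (b1 : ∀ k, i ≤ k → k < j1 → ¬ P k) (c1 : j1 < n → P j1)
    (a2 : i ≤ j2) (a2' : j2 ≤ n) (b2 : ∀ k, i ≤ k → k < j2 → ¬ P k) (c2 : j2 < n → P j2) : j1 = j2 := by
  by_contra h
  rcases Nat.lt_or_ge j1 j2 with hlt | hge
  · exact b2 j1 a1 hlt (c1 (by omega))
  · exact b1 j2 a2 (by omega) (c2 (by omega))

theorem pvStopGo_char (rs : List (List Int)) (thr : Int) :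
    ∀ (l : List (List Int)) (idx : Nat), idx + l.length = rs.length → l = rs.drop idx →
      idx ≤ pvStopGo rs thr idx l ∧ pvStopGo rs thr idx l ≤ rs.length ∧
      (∀ k, idx ≤ k → k < pvStopGo rs thr idx l → ¬ pvC1 rs k > thr) ∧
      (pvStopGo rs thr idx l < rs.length → pvC1 rs (pvStopGo rs thr idx l) > thr) := by
  intro l
  induction l with
  | nil =>
    intro idx hlen _
    simp only [pvStopGo]
    exact ⟨le_refl _, by simp at hlen; omega, by omega, by simp at hlen; omega⟩
  | cons r rest ih =>
    intro idx hlen hdrop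
    rw [pvStopGo]
    split_ifs with hc
    · exact ⟨le_refl _, by simp at hlen; omega, by omega, fun _ => hc⟩
    · have hdrop' : rest = rs.drop (idx + 1) := by
        rw [← List.tail_drop, ← hdrop]; rfl
      obtain ⟨a, b, c, d⟩ := ih (idx + 1) (by simp at hlen ⊢; omega) hdrop'
      refine ⟨by omega, b, ?_, d⟩
      intro k hk hk2
      by_cases hkm : k = idx
      · subst hkm; exact hc
      · exact c k (by omega) hk2

-- ---- invariant initialization and preservation ----
theorem pvInvL_nil (rs : List (List Int)) : pvInvL rs 0 [] :=
  ⟨by simp, by simp, by intro i h; omega⟩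

theorem pvInvL_step (rs : List (List Int)) (idx : Nat) (stk : List (Nat × Int))
    (h : pvInvL rs idx stk) :
    pvInvL rs (idx + 1) (pvPopGe (pvC2 rs idx) stk ++ [(idx, pvC2 rs idx)]) := by
  obtain ⟨h1, h2, h3⟩ := h
  refine ⟨?_, ?_, ?_⟩
  · intro p hp
    rcases List.mem_append.mp hp with hp | hp
    · have := h1 p (popGe_subset _ _ p hp); exact ⟨by omega, this.2⟩
    · simp at hp; subst hp; exact ⟨by omega, rfl⟩
  · rw [List.pairwise_append]
    refine ⟨popGe_pairwise _ _ _ h2, List.pairwise_singleton _ _, ?_⟩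
    intro p hp q hq; simp at hq; subst hq
    exact ⟨(h1 p (popGe_subset _ _ p hp)).1, popGe_small _ _ h2 p hp⟩
  · intro i hi
    by_cases hii : i = idx
    · subst hii
      exact ⟨(i, pvC2 rs i), by simp, le_refl _, le_refl _⟩
    · obtain ⟨p, hp, hle, hv⟩ := h3 i (by omega)
      rcases popGe_dropped (pvC2 rs idx) stk p hp with hin | hbig
      · exact ⟨p, List.mem_append_left _ hin, hle, hv⟩
      · exact ⟨(idx, pvC2 rs idx), by simp, by omega, le_trans hbig hv⟩

theorem pvInvR_nil (rs : List (List Int)) : pvInvR rs rs.length [] :=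
  ⟨by simp, by simp, by intro j h1 h2; omega⟩

theorem pvInvR_step (rs : List (List Int)) (i : Nat) (stk : List (Nat × Int))
    (h : pvInvR rs (i + 1) stk) (hn : i < rs.length) :
    pvInvR rs i (pvPopLe (pvC1 rs i) stk ++ [(i, pvC1 rs i)]) := by
  obtain ⟨h1, h2, h3⟩ := h
  refine ⟨?_, ?_, ?_⟩
  · intro p hp
    rcases List.mem_append.mp hp with hp | hp
    · have := h1 p (popLe_subset _ _ p hp); exact ⟨by omega, this.2.1, this.2.2⟩
    · simp at hp; subst hp; exact ⟨le_refl _, hn, rfl⟩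
  · rw [List.pairwise_append]
    refine ⟨popLe_pairwise _ _ _ h2, List.pairwise_singleton _ _, ?_⟩
    intro p hp q hq; simp at hq; subst hq
    exact ⟨by have := (h1 p (popLe_subset _ _ p hp)).1; omega, popLe_big _ _ h2 p hp⟩
  · intro j hj hj2
    by_cases hji : j = i
    · subst hji
      exact ⟨(j, pvC1 rs j), by simp, le_refl _, le_refl _⟩
    · obtain ⟨p, hp, hle, hv⟩ := h3 j (by omega) hj2
      rcases popLe_dropped (pvC1 rs i) stk p hp with hin | hsmall
      · exact ⟨p, List.mem_append_left _ hin, hle, hv⟩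
      · exact ⟨(i, pvC1 rs i), by simp, by omega, le_trans hv hsmall⟩

-- value-list access helper
theorem pvValsGet (stk : List (Nat × Int)) (j : Nat) (hj : j < stk.length) :
    (stk.map Prod.snd).getD j 0 = (stk[j]).2 := by
  rw [List.getD_eq_getElem _ _ (by simpa using hj), List.getElem_map]

-- ---- query lemmas: the stack binary search finds A's break/stop position ----
theorem pvQueryL (rs : List (List Int)) (idx : Nat) (stk : List (Nat × Int)) (thr : Int)
    (hinv : pvInvL rs idx stk) :
    (if 0 < pvBsLt (stk.map Prod.snd) thr 0 (stk.map Prod.snd).length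
      then ((stk.getD (pvBsLt (stk.map Prod.snd) thr 0 (stk.map Prod.snd).length - 1) (0, 0)).1 : Int)
      else -1) + 1 = (pvBreak1 rs thr idx : Int) := by
  obtain ⟨h1, h2, h3⟩ := hinv
  have hpw := List.pairwise_iff_getElem.mp h2
  have hsort : ∀ a b, a ≤ b → b < (stk.map Prod.snd).length →
      (stk.map Prod.snd).getD a 0 ≤ (stk.map Prod.snd).getD b 0 := by
    intro a b hab hb
    rw [List.length_map] at hb
    rw [pvValsGet _ _ (by omega), pvValsGet _ _ hb]
    rcases Nat.lt_or_ge a b with h | h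
    · exact le_of_lt (hpw a b (by omega) hb h).2
    · have : a = b := by omega
      subst this; exact le_refl _
  obtain ⟨⟨hb0, hbl⟩, hA, hB⟩ := pvBsLt_spec (stk.map Prod.snd) thr hsort
    (stk.map Prod.snd).length 0 (stk.map Prod.snd).length (le_refl _) (by omega) (le_refl _)
    (by omega) (by intro k h h2; omega)
  set cnt := pvBsLt (stk.map Prod.snd) thr 0 (stk.map Prod.snd).length with hcnt
  rw [List.length_map] at hbl
  obtain ⟨ba, bb, bc⟩ := pvBreak1_char rs thr idx
  by_cases hpos : 0 < cnt
  · rw [if_pos hpos]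
    have hq : cnt - 1 < stk.length := by omega
    set q := stk[cnt - 1]'hq with hqdef
    have hqd : stk.getD (cnt - 1) (0, 0) = q := List.getD_eq_getElem _ _ hq
    have hqmem : q ∈ stk := List.getElem_mem hq
    have hqlt : q.2 < thr := by
      have := hA (cnt - 1) (by omega)
      rwa [pvValsGet _ _ hq] at this
    have hqv := h1 q hqmem
    -- q.1 + 1 satisfies the break characterization
    have hmid : ∀ k, q.1 + 1 ≤ k → k < idx → ¬ pvC2 rs k < thr := by
      intro k hk hk2 hc
      obtain ⟨p, hp, hple, hpv⟩ := h3 k hk2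
      obtain ⟨j, hj, hjp⟩ := List.mem_iff_getElem.mp hp
      have hpthr : (stk.map Prod.snd).getD j 0 < thr := by
        rw [pvValsGet _ _ hj, hjp]
        exact lt_of_le_of_lt hpv hc
      have hjcnt : j < cnt := by
        by_contra hge
        exact (hB j (by omega) (by simpa using hj)) hpthr
      have hple' : p.1 ≤ q.1 := by
        rcases Nat.lt_or_ge j (cnt - 1) with hlt | hge
        · have := (hpw j (cnt - 1) hj hq hlt).1
          rw [hjp] at this; exact le_of_lt this
        · have hj' : j = cnt - 1 := by omega
          subst hj'
          have hpq : p = q := by rw [← hjp]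
          rw [hpq]
      omega
    have := pvUniqBreak (fun k => pvC2 rs k < thr) idx (q.1 + 1) (pvBreak1 rs thr idx)
      (by omega) hmid
      (by intro _
          have he : pvC2 rs (q.1 + 1 - 1) = pvC2 rs q.1 := by norm_num
          rw [he, ← hqv.2]; exact hqlt)
      ba bb bc
    rw [hqd, ← this]
    push_cast; ring
  · rw [if_neg hpos]
    have hcnt0 : cnt = 0 := by omega
    have hmid : ∀ k, 0 ≤ k → k < idx → ¬ pvC2 rs k < thr := by
      intro k _ hk2 hc
      obtain ⟨p, hp, hple, hpv⟩ := h3 k hk2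
      obtain ⟨j, hj, hjp⟩ := List.mem_iff_getElem.mp hp
      refine hB j (by omega) (by simpa using hj) ?_
      rw [pvValsGet _ _ hj, hjp]
      exact lt_of_le_of_lt hpv hc
    have := pvUniqBreak (fun k => pvC2 rs k < thr) idx 0 (pvBreak1 rs thr idx)
      (by omega) hmid (by omega) ba bb bc
    rw [← this]
    simp

theorem pvQueryR (rs : List (List Int)) (i : Nat) (stk : List (Nat × Int)) (thr : Int)
    (hinv : pvInvR rs i stk) (hi : i ≤ rs.length) :
    (if 0 < pvBsGt (stk.map Prod.snd) thr 0 (stk.map Prod.snd).length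
      then (stk.getD (pvBsGt (stk.map Prod.snd) thr 0 (stk.map Prod.snd).length - 1) (0, 0)).1
      else rs.length) = pvStopGo rs thr i (rs.drop i) := by
  obtain ⟨h1, h2, h3⟩ := hinv
  have hpw := List.pairwise_iff_getElem.mp h2
  have hsort : ∀ a b, a ≤ b → b < (stk.map Prod.snd).length →
      (stk.map Prod.snd).getD b 0 ≤ (stk.map Prod.snd).getD a 0 := by
    intro a b hab hb
    rw [List.length_map] at hb
    rw [pvValsGet _ _ hb, pvValsGet _ _ (by omega : a < stk.length)]
    rcases Nat.lt_or_ge a b with h | h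
    · exact le_of_lt (hpw a b (by omega) hb h).2
    · have : a = b := by omega
      subst this; exact le_refl _
  obtain ⟨⟨hb0, hbl⟩, hA, hB⟩ := pvBsGt_spec (stk.map Prod.snd) thr hsort
    (stk.map Prod.snd).length 0 (stk.map Prod.snd).length (le_refl _) (by omega) (le_refl _)
    (by omega) (by intro k h h2; omega)
  set cnt := pvBsGt (stk.map Prod.snd) thr 0 (stk.map Prod.snd).length with hcnt
  rw [List.length_map] at hbl
  obtain ⟨sa, sb, sc, sd⟩ := pvStopGo_char rs thr (rs.drop i) i (by simp; omega) rfl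
  by_cases hpos : 0 < cnt
  · rw [if_pos hpos]
    have hq : cnt - 1 < stk.length := by omega
    set q := stk[cnt - 1]'hq with hqdef
    have hqd : stk.getD (cnt - 1) (0, 0) = q := List.getD_eq_getElem _ _ hq
    have hqmem : q ∈ stk := List.getElem_mem hq
    have hqgt : q.2 > thr := by
      have := hA (cnt - 1) (by omega)
      rwa [pvValsGet _ _ hq] at this
    have hqv := h1 q hqmem
    have hmid : ∀ k, i ≤ k → k < q.1 → ¬ pvC1 rs k > thr := by
      intro k hk hk2 hc
      obtain ⟨p, hp, hple, hpv⟩ := h3 k hk (by omega)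
      obtain ⟨j, hj, hjp⟩ := List.mem_iff_getElem.mp hp
      have hpthr : (stk.map Prod.snd).getD j 0 > thr := by
        rw [pvValsGet _ _ hj, hjp]
        exact lt_of_lt_of_le hc hpv
      have hjcnt : j < cnt := by
        by_contra hge
        exact (hB j (by omega) (by simpa using hj)) hpthr
      have hple' : q.1 ≤ p.1 := by
        rcases Nat.lt_or_ge j (cnt - 1) with hlt | hge
        · have := (hpw j (cnt - 1) hj hq hlt).1
          rw [hjp] at this; exact le_of_lt this
        · have hj' : j = cnt - 1 := by omega
          subst hj'
          have hpq : p = q := by rw [← hjp]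
          rw [hpq]
      omega
    have := pvUniqStop (fun k => pvC1 rs k > thr) i rs.length q.1 (pvStopGo rs thr i (rs.drop i))
      hqv.1 (le_of_lt hqv.2.1) hmid (by intro _; rw [← hqv.2.2]; exact hqgt)
      sa sb sc sd
    rw [hqd, this]
  · rw [if_neg hpos]
    have hmid : ∀ k, i ≤ k → k < rs.length → ¬ pvC1 rs k > thr := by
      intro k hk hk2 hc
      obtain ⟨p, hp, hple, hpv⟩ := h3 k hk hk2
      obtain ⟨j, hj, hjp⟩ := List.mem_iff_getElem.mp hp
      refine hB j (by omega) (by simpa using hj) ?_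
      rw [pvValsGet _ _ hj, hjp]
      exact lt_of_lt_of_le hc hpv
    exact pvUniqStop (fun k => pvC1 rs k > thr) i rs.length rs.length (pvStopGo rs thr i (rs.drop i))
      hi (le_refl _) hmid (by omega) sa sb sc sd

-- ---- prefix-sum lemmas ----
theorem pvRow_lt (rs : List (List Int)) (m : Nat) (hm : m < rs.length) : pvRow rs m = rs[m] := by
  simp [pvRow, PySem.List.pyGet?_natCast, List.getElem?_eq_getElem hm]

theorem pvP3_succ (t1 t2 : Int) (rs : List (List Int)) (m : Nat) (hm : m < rs.length) :
    pvP3 t1 t2 rs (m + 1) = pvP3 t1 t2 rs m + pvW3 t1 t2 (pvRow rs m) := by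
  have h2 : m < (rs.map (pvW3 t1 t2)).length := by simpa using hm
  unfold pvP3
  rw [List.map_take, List.take_add_one, List.getElem?_eq_getElem h2]
  simp [List.map_take, List.getElem_map, pvRow_lt rs m hm]

theorem pvP2_succ (t1 t2 : Int) (rs : List (List Int)) (m : Nat) (hm : m < rs.length) :
    pvP2 t1 t2 rs (m + 1) = pvP2 t1 t2 rs m + pvW2 t1 t2 (pvRow rs m) := by
  have h2 : m < (rs.map (pvW2 t1 t2)).length := by simpa using hm
  unfold pvP2
  rw [List.map_take, List.take_add_one, List.getElem?_eq_getElem h2]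
  simp [List.map_take, List.getElem_map, pvRow_lt rs m hm]

theorem pvP3_cons (t1 t2 : Int) (r : List Int) (rest : List (List Int)) (m : Nat) :
    pvP3 t1 t2 (r :: rest) (m + 1) = pvW3 t1 t2 r + pvP3 t1 t2 rest m := by
  simp [pvP3]

theorem pvP2_cons (t1 t2 : Int) (r : List Int) (rest : List (List Int)) (m : Nat) :
    pvP2 t1 t2 (r :: rest) (m + 1) = pvW2 t1 t2 r + pvP2 t1 t2 rest m := by
  simp [pvP2]

theorem pvPrefixFst (t1 t2 : Int) :
    ∀ (rs : List (List Int)) (s3 s2 : Int) (k : Nat), k ≤ rs.length →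
      (s3 :: (pvPrefixGo t1 t2 s3 s2 rs).1).getD k 0 = s3 + pvP3 t1 t2 rs k := by
  intro rs
  induction rs with
  | nil =>
    intro s3 s2 k hk
    have : k = 0 := by simpa using hk
    subst this
    simp [pvP3]
  | cons r rest ih =>
    intro s3 s2 k hk
    cases k with
    | zero => simp [pvP3]
    | succ m =>
      rw [pvPrefixGo]
      have hw1 : (if pvEl r 2 - pvEl r 1 > t1 then ((3 : Int), (3 : Int))
          else if pvEl r 2 - pvEl r 1 > t2 then ((2 : Int), (2 : Int)) else ((1 : Int), (0 : Int))).1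
          = pvW3 t1 t2 r := by
        unfold pvW3; split_ifs <;> rfl
      simp only [List.getD_cons_succ]
      rw [ih (s3 + _) (s2 + _) m (by simpa using hk), pvP3_cons, hw1]
      ring

theorem pvPrefixSnd (t1 t2 : Int) :
    ∀ (rs : List (List Int)) (s3 s2 : Int) (k : Nat), k ≤ rs.length →
      (s2 :: (pvPrefixGo t1 t2 s3 s2 rs).2).getD k 0 = s2 + pvP2 t1 t2 rs k := by
  intro rs
  induction rs with
  | nil =>
    intro s3 s2 k hk
    have : k = 0 := by simpa using hk
    subst this
    simp [pvP2]
  | cons r rest ih =>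
    intro s3 s2 k hk
    cases k with
    | zero => simp [pvP2]
    | succ m =>
      rw [pvPrefixGo]
      have hw2 : (if pvEl r 2 - pvEl r 1 > t1 then ((3 : Int), (3 : Int))
          else if pvEl r 2 - pvEl r 1 > t2 then ((2 : Int), (2 : Int)) else ((1 : Int), (0 : Int))).2
          = pvW2 t1 t2 r := by
        unfold pvW2; split_ifs <;> rfl
      simp only [List.getD_cons_succ]
      rw [ih (s3 + _) (s2 + _) m (by simpa using hk), pvP2_cons, hw2]
      ring

-- ---- A's scans as prefix-sum differences ----
theorem pvLeftGo_eq (rs : List (List Int)) (radius t1 t2 reg1 : Int) :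
    ∀ (m : Nat) (acc : Int), m ≤ rs.length →
      pvLeftGo rs radius t1 t2 reg1 m acc
        = acc + pvP3 t1 t2 rs m - pvP3 t1 t2 rs (pvBreak1 rs (reg1 - radius) m) := by
  intro m
  induction m with
  | zero => intro acc _; simp [pvLeftGo, pvBreak1, pvP3]
  | succ i ih =>
    intro acc hm
    rw [pvLeftGo, pvBreak1]
    have hcond : (reg1 - pvEl (pvRow rs i) 2 > radius) ↔ (pvC2 rs i < reg1 - radius) := by
      unfold pvC2; omega
    by_cases hc : pvC2 rs i < reg1 - radius
    · rw [if_pos (hcond.mpr hc), if_pos hc]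
      ring
    · rw [if_neg (fun h => hc (hcond.mp h)), if_neg hc]
      rw [ih _ (by omega), pvP3_succ t1 t2 rs i (by omega)]
      have : (if pvEl (pvRow rs i) 2 - pvEl (pvRow rs i) 1 > t1 then (3 : Int)
          else if pvEl (pvRow rs i) 2 - pvEl (pvRow rs i) 1 > t2 then 2 else 1)
          = pvW3 t1 t2 (pvRow rs i) := by unfold pvW3; split_ifs <;> rfl
      rw [this]
      ring

theorem pvRightGo_eq (rs : List (List Int)) (radius t1 t2 reg2 : Int) :
    ∀ (l : List (List Int)) (idx : Nat) (acc : Int), idx + l.length = rs.length → l = rs.drop idx →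
      pvRightGo radius t1 t2 reg2 l acc
        = acc + pvP2 t1 t2 rs (pvStopGo rs (reg2 + radius) idx l) - pvP2 t1 t2 rs idx := by
  intro l
  induction l with
  | nil => intro idx acc _ _; simp [pvRightGo, pvStopGo]
  | cons now rest ih =>
    intro idx acc hlen hdrop
    have hidx : idx < rs.length := by simp at hlen; omega
    have hcons := List.drop_eq_getElem_cons hidx
    rw [← hdrop] at hcons
    have hnow : now = pvRow rs idx := by
      rw [pvRow_lt rs idx hidx]; exact (List.cons.injEq _ _ _ _ ▸ hcons).1
    have hrest : rest = rs.drop (idx + 1) := (List.cons.injEq _ _ _ _ ▸ hcons).2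
    rw [pvRightGo, pvStopGo]
    have hcond : (pvEl now 1 - reg2 > radius) ↔ (pvC1 rs idx > reg2 + radius) := by
      unfold pvC1; rw [← hnow]; omega
    by_cases hc : pvC1 rs idx > reg2 + radius
    · rw [if_pos (hcond.mpr hc), if_pos hc]
      ring
    · rw [if_neg (fun h => hc (hcond.mp h)), if_neg hc]
      rw [ih (idx + 1) _ (by simp at hlen ⊢; omega) hrest, pvP2_succ t1 t2 rs idx hidx]
      have : (if pvEl now 2 - pvEl now 1 > t1 then (3 : Int)
          else if pvEl now 2 - pvEl now 1 > t2 then 2 else 0)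
          = pvW2 t1 t2 (pvRow rs idx) := by rw [← hnow]; unfold pvW2; split_ifs <;> rfl
      rw [this]
      ring

def pvDenL (rs : List (List Int)) (radius t1 t2 : Int) (j : Nat) : Int :=
  pvP3 t1 t2 rs j - pvP3 t1 t2 rs (pvBreak1 rs (pvC1 rs j - radius) j)

def pvDenR (rs : List (List Int)) (radius t1 t2 : Int) (j : Nat) : Int :=
  pvP2 t1 t2 rs (pvStopGo rs (pvC2 rs j + radius) j (rs.drop j)) - pvP2 t1 t2 rs j

theorem pvCalDensity_eq (rs : List (List Int)) (radius t1 t2 : Int) :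
    pvCalDensity rs radius t1 t2
      = (List.range rs.length).map (fun j => pvDenL rs radius t1 t2 j + pvDenR rs radius t1 t2 j) := by
  unfold pvCalDensity
  apply List.map_congr_left
  intro j hj
  have hjlt : j < rs.length := List.mem_range.mp hj
  rw [pvLeftGo_eq rs radius t1 t2 _ j 0 (by omega)]
  rw [pvRightGo_eq rs radius t1 t2 _ (rs.drop j) j _ (by simp; omega) rfl]
  unfold pvDenL pvDenR pvC1 pvC2
  ring

-- ---- B's passes produce the same densities ----
theorem pvLeftPass_eq (rs : List (List Int)) (radius t1 t2 : Int) :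
    ∀ (l : List (List Int)) (idx : Nat) (stk : List (Nat × Int)),
      idx + l.length = rs.length → l = rs.drop idx → pvInvL rs idx stk →
      pvLeftPass (0 :: (pvPrefixGo t1 t2 0 0 rs).1) radius idx stk l
        = (List.range' idx l.length).map (pvDenL rs radius t1 t2) := by
  intro l
  induction l with
  | nil => intro idx stk _ _ _; simp [pvLeftPass]
  | cons reg rest ih =>
    intro idx stk hlen hdrop hinv
    have hidx : idx < rs.length := by simp at hlen; omega
    have hcons := List.drop_eq_getElem_cons hidx
    rw [← hdrop] at hcons
    have hreg : reg = pvRow rs idx := by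
      rw [pvRow_lt rs idx hidx]; exact (List.cons.injEq _ _ _ _ ▸ hcons).1
    have hrest : rest = rs.drop (idx + 1) := (List.cons.injEq _ _ _ _ ▸ hcons).2
    rw [pvLeftPass]
    have hq := pvQueryL rs idx stk (pvEl reg 1 - radius) hinv
    have hbrk := (pvBreak1_char rs (pvEl reg 1 - radius) idx).1
    rw [List.length_cons, List.range'_succ]
    rw [List.map_cons]
    congr 1
    · -- the emitted contribution is pvDenL idx
      rw [hq]
      have h1 : ((pvBreak1 rs (pvEl reg 1 - radius) idx : Nat) : Int) = (((pvBreak1 rs (pvEl reg 1 - radius) idx) : Nat) : Int) := rfl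
      rw [pvGetNat, pvGetNat]
      rw [pvPrefixFst t1 t2 rs 0 0 idx (by omega)]
      rw [pvPrefixFst t1 t2 rs 0 0 _ (by omega)]
      unfold pvDenL pvC1
      rw [hreg]
      ring
    · -- tail via the invariant step
      have : pvEl reg 2 = pvC2 rs idx := by rw [hreg]; rfl
      rw [this]
      exact ih (idx + 1) _ (by simp at hlen ⊢; omega) hrest (pvInvL_step rs idx stk hinv)

theorem pvRightPass_eq (rs : List (List Int)) (radius t1 t2 : Int) :
    ∀ (i : Nat) (stk : List (Nat × Int)) (acc : List Int), i ≤ rs.length → pvInvR rs i stk →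
      pvRightPass rs (0 :: (pvPrefixGo t1 t2 0 0 rs).2) radius rs.length i stk acc
        = ((List.range' 0 i).map (pvDenR rs radius t1 t2)) ++ acc := by
  intro i
  induction i with
  | zero => intro stk acc _ _; simp [pvRightPass]
  | succ i ih =>
    intro stk acc hle hinv
    simp only [pvRightPass]
    have hinv' := pvInvR_step rs i stk hinv (by omega)
    have hs1 : pvEl (pvRow rs i) 1 = pvC1 rs i := rfl
    rw [hs1]
    have hq := pvQueryR rs i (pvPopLe (pvC1 rs i) stk ++ [(i, pvC1 rs i)])
      (pvEl (pvRow rs i) 2 + radius) hinv' (by omega)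
    rw [hq]
    obtain ⟨sa, sb, _, _⟩ := pvStopGo_char rs (pvEl (pvRow rs i) 2 + radius) (rs.drop i) i
      (by simp; omega) rfl
    rw [pvGetNat, pvGetNat]
    rw [pvPrefixSnd t1 t2 rs 0 0 _ sb, pvPrefixSnd t1 t2 rs 0 0 i (by omega)]
    rw [ih _ _ (by omega) hinv']
    rw [List.range'_concat]
    have hgi : pvDenR rs radius t1 t2 i
        = (0 + pvP2 t1 t2 rs (pvStopGo rs (pvEl (pvRow rs i) 2 + radius) i (rs.drop i)))
          - (0 + pvP2 t1 t2 rs i) := by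
      unfold pvDenR pvC2
      ring
    rw [← hgi]
    simp

theorem pvZipMap (f g : Nat → Int) (l : List Nat) :
    List.zipWith (· + ·) (l.map f) (l.map g) = l.map (fun j => f j + g j) := by
  induction l with
  | nil => rfl
  | cons x xs ih => simp [ih]

-- ---- the two merge folds coincide ----
theorem pvMerge_eq (clu1 clu2 : Int) (d : List Int) :
    ∀ (l : List (List Int)) (idx : Nat) (pre : Option (List Int)) (acc : List (List Int)),
      pvMergeA clu1 clu2 d idx l pre acc = pvMergeB clu1 clu2 d idx l pre acc := by
  intro l
  induction l with
  | nil => intro idx pre acc; cases pre <;> rfl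
  | cons r rest ih =>
    intro idx pre acc
    cases pre with
    | none => rw [pvMergeA, pvMergeB]; exact ih _ _ _
    | some p =>
      simp only [pvMergeA, pvMergeB]
      split_ifs <;> exact ih _ _ _

-- ===== VERDICT (by name: the statement is the Claim_ definition above) =====
theorem cluster_by_density_spec : Claim_equal_cluster_by_density := by
  unfold Claim_equal_cluster_by_density
  intro rs clu1 clu2 t1 t2 radius _ _
  unfold Spec_cluster_by_density cluster_by_density cluster_by_density_alt
  simp only []
  rw [pvLeftPass_eq rs radius t1 t2 rs 0 [] (by simp) (by simp) (pvInvL_nil rs)]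
  rw [pvRightPass_eq rs radius t1 t2 rs.length [] [] (le_refl _) (pvInvR_nil rs)]
  rw [List.append_nil, pvZipMap, pvCalDensity_eq, List.range_eq_range']
  exact pvMerge_eq _ _ _ _ _ _ _
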